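-- pv_equiv track=rewrite | github.com/HaolingZHANG/bioe-201 | 1/code.11.py | function
-- ===== SOURCE A (Python) =====
-- from itertools import product
--
-- def function(sequence: str,
--              length: int) -> list:
--     patterns = {}
--     for location in range(len(sequence) - length + 1):
--         pattern = sequence[location: location + length]
--         if pattern in patterns:
--             patterns[pattern] += 1
--         else:
--             patterns[pattern] = 1
--
--     results = []
--     for order in product("ACGT", repeat=length):
--         pattern = ''.join(order)
--         if pattern in patterns:
--             results.append(patterns[pattern])
--         else:
--             results.append(0)
--
--     return results
-- ===== SOURCE B (Python) =====
-- from itertools import product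
--
-- def function(sequence: str,
--              length: int) -> list:
--     results = []
--     for order in product("ACGT", repeat=length):
--         pattern = ''.join(order)
--         count = 0
--         for location in range(len(sequence) - length + 1):
--             if sequence[location: location + length] == pattern:
--                 count += 1
--         results.append(count)
--     return results
-- ===== Notes on version B (the rewrite author's own statement) =====
-- stated objective: alternative
-- what changed: B drops A's counting dict entirely: for each ACGT pattern it rescans the sequence with a sliding window and counts overlapping matches directly, instead of building a hash index of all windows and looking each pattern up.
import Mathlib
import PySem

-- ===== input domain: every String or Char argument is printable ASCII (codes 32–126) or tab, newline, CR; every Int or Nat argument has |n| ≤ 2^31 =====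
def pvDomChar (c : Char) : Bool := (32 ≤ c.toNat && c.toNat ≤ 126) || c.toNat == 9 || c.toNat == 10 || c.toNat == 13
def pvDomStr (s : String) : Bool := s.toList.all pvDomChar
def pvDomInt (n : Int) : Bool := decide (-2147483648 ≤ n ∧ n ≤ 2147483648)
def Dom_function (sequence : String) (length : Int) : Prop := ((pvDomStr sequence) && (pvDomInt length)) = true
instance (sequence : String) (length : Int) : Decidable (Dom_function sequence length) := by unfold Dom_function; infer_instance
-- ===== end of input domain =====

-- B replaces A's build-a-dict-then-lookup k-mer counting by a per-pattern sliding-window rescan (alternative decomposition, same results).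


-- ===== PORT A =====
-- itertools.product("ACGT", repeat=n) as lists of chars, in Python's order (first coordinate slowest);
-- shared by both ports because both Pythons iterate over exactly this product.
def pyProductACGT : Nat → List (List Char)
  | 0 => [[]]
  | n + 1 => ['A', 'C', 'G', 'T'].flatMap (fun c => (pyProductACGT n).map (c :: ·))

def function (sequence : String) (length : Int) : List Int :=
  let s := sequence.toList
  let patterns :=
    (PySem.List.pyRange 0 ((s.length : Int) - length + 1) 1).foldl
      (fun (d : PySem.Dict (List Char) Int) location =>
        let pattern := PySem.List.slice s (some location) (some (location + length))
        match PySem.Dict.get? d pattern with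
        | some v => PySem.Dict.insert d pattern (v + 1)
        | none => PySem.Dict.insert d pattern 1)
      (PySem.Dict.empty : PySem.Dict (List Char) Int)
  (pyProductACGT length.toNat).foldl
    (fun results pattern =>
      match PySem.Dict.get? patterns pattern with
      | some v => results ++ [v]
      | none => results ++ [0])
    ([] : List Int)

-- ===== PORT B =====
def function_alt (sequence : String) (length : Int) : List Int :=
  let s := sequence.toList
  (pyProductACGT length.toNat).map (fun pattern =>
    (PySem.List.pyRange 0 ((s.length : Int) - length + 1) 1).foldl
      (fun count location =>
        if PySem.List.slice s (some location) (some (location + length)) = pattern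
        then count + 1 else count)
      0)

-- ===== PRECONDITION & SPEC =====
-- Pre_ excludes negative length, on which A raises ValueError (itertools.product with negative repeat).
def Pre_function (sequence : String) (length : Int) : Prop := 0 ≤ length
instance (sequence : String) (length : Int) : Decidable (Pre_function sequence length) := by
  unfold Pre_function; infer_instance

def pvWitness_function : String × Int := ("ACGTAC", 2)

def Spec_function (sequence : String) (length : Int) (out : List Int) : Prop := out = function_alt sequence length
instance (sequence : String) (length : Int) (out : List Int) : Decidable (Spec_function sequence length out) := by unfold Spec_function; infer_instance

-- ===== CLAIM (what is proved, stated in full; the proofs are below) =====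
def Claim_equal_function : Prop := ∀ (sequence : String) (length : Int), Dom_function sequence length → Pre_function sequence length → Spec_function sequence length (function sequence length)

-- ===== LEMMAS AND PROOFS =====

-- A's dict-building step is a counting insert.
theorem pv_dict_fold_eq (s : List Char) (length : Int) (R : List Int) (d : PySem.Dict (List Char) Int) :
    R.foldl
      (fun (d : PySem.Dict (List Char) Int) location =>
        let pattern := PySem.List.slice s (some location) (some (location + length))
        match PySem.Dict.get? d pattern with
        | some v => PySem.Dict.insert d pattern (v + 1)
        | none => PySem.Dict.insert d pattern 1) (d : PySem.Dict (List Char) Int)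
    = (R.map (fun location => PySem.List.slice s (some location) (some (location + length)))).foldl
        (fun d x => PySem.Dict.insert d x (PySem.Dict.getD d x 0 + 1)) d := by
  rw [List.foldl_map]
  refine PySem.List.foldl_congr_mem _ _ _ _ (fun d loc _ => ?_)
  cases h : PySem.Dict.get? d (PySem.List.slice s (some loc) (some (loc + length))) with
  | some v => simp only [PySem.Dict.getD_of_get?_eq_some d 0 h, h]
  | none => simp only [PySem.Dict.getD_of_get?_eq_none d 0 h, h, zero_add]

theorem function_eq_counts (sequence : String) (length : Int) :
    function sequence length
    = (pyProductACGT length.toNat).map (fun p =>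
        (((PySem.List.pyRange 0 ((sequence.toList.length : Int) - length + 1) 1).map
            (fun location => PySem.List.slice sequence.toList (some location) (some (location + length)))).count p : Int)) := by
  unfold function
  dsimp only
  rw [pv_dict_fold_eq]
  set w := (PySem.List.pyRange 0 ((sequence.toList.length : Int) - length + 1) 1).map
      (fun location => PySem.List.slice sequence.toList (some location) (some (location + length))) with hw
  set d : PySem.Dict (List Char) Int :=
    w.foldl (fun d x => PySem.Dict.insert d x (PySem.Dict.getD d x 0 + 1)) PySem.Dict.empty with hd
  have hg : ∀ p : List Char, PySem.Dict.getD d p 0 = ((w.count p : Nat) : Int) := by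
    intro p
    rw [hd, PySem.Dict.getD_foldl_insert_add_one]
    simp
  have h1 : (pyProductACGT length.toNat).foldl
      (fun (results : List Int) pattern =>
        match PySem.Dict.get? d pattern with
        | some v => results ++ [v]
        | none => results ++ [0]) ([] : List Int)
      = (pyProductACGT length.toNat).foldl
          (fun (results : List Int) pattern => results ++ [PySem.Dict.getD d pattern 0]) ([] : List Int) := by
    refine PySem.List.foldl_congr_mem _ _ _ _ (fun res p _ => ?_)
    cases h : PySem.Dict.get? d p with
    | some v => rw [PySem.Dict.getD_of_get?_eq_some d 0 h]
    | none => rw [PySem.Dict.getD_of_get?_eq_none d 0 h]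
  rw [h1, PySem.List.foldl_append_singleton_eq_map (fun p => PySem.Dict.getD d p 0)]
  simp only [List.nil_append]
  exact List.map_congr_left (fun p _ => hg p)

theorem function_alt_eq_counts (sequence : String) (length : Int) :
    function_alt sequence length
    = (pyProductACGT length.toNat).map (fun p =>
        (((PySem.List.pyRange 0 ((sequence.toList.length : Int) - length + 1) 1).map
            (fun location => PySem.List.slice sequence.toList (some location) (some (location + length)))).count p : Int)) := by
  unfold function_alt
  dsimp only
  refine List.map_congr_left (fun p _ => ?_)
  rw [← List.foldl_map (f := fun location => PySem.List.slice sequence.toList (some location) (some (location + length)))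
      (g := fun (count : Int) x => if x = p then count + 1 else count)]
  rw [PySem.List.foldl_ite_add_one]
  simp only [List.count, Int.zero_add]
  congr 1
  apply List.countP_congr
  intro x _
  simp

-- ===== VERDICT (by name: the statement is the Claim_ definition above) =====
theorem function_spec : Claim_equal_function := by
  intro sequence length _ _
  unfold Spec_function
  rw [function_eq_counts, function_alt_eq_counts]
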